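-- pv_equiv track=rewrite | github.com/chundrac/idcc | cognate_concept_models/sound_change_simulations/simulate_sound_change.py | detectIDCC
-- ===== SOURCE A (Python) =====
-- def detectIDCC(w):
--     w_ = w.split(' + ')
--     counter = 0
--     for w__ in w_:
--         ss = w__.split()
--         for i,s in enumerate(ss):
--             if i > 0 and s == ss[i-1]:
--                 counter += 1
--     if counter > 0:
--         return(1)
--     else:
--         return(0)
-- ===== SOURCE B (Python) =====
-- def detectIDCC(w):
--     # single left-to-right character scan: no intermediate split lists;
--     # tracks the current token and the previous token of the current segment
--     prev = None
--     cur = []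
--     i = 0
--     n = len(w)
--     while i < n:
--         if w.startswith(' + ', i):
--             if cur and cur == prev:
--                 return 1
--             prev = None
--             cur = []
--             i += 3
--         elif w[i].isspace():
--             if cur:
--                 if cur == prev:
--                     return 1
--                 prev = cur
--                 cur = []
--             i += 1
--         else:
--             cur.append(w[i])
--             i += 1
--     if cur and cur == prev:
--         return 1
--     return 0
-- ===== Notes on version B (the rewrite author's own statement) =====
-- stated objective: alternative
-- what changed: A splits the string on ' + ' and then whitespace-splits every segment into token lists before comparing neighbours; B makes a single left-to-right character scan that never builds the split lists, tracking only the current token and the previous token of the current segment and returning 1 as soon as an adjacent duplicate is seen.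
import Mathlib
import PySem

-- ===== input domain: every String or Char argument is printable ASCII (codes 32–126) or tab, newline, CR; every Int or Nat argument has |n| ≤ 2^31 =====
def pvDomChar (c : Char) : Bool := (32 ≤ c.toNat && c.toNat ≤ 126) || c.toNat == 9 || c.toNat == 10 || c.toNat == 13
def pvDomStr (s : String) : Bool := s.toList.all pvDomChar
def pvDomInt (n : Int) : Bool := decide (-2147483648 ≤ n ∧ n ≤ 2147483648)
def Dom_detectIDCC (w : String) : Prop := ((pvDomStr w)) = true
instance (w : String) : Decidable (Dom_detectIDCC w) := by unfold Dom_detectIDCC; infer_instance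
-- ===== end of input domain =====

-- B replaces the split(' + ')/split() double pass by a single left-to-right character
-- scan that tracks the current and previous token of the current segment (objective: alternative).

-- ===== PORT A =====
-- A: w.split(' + '), then per segment split() and count adjacent equal tokens; 1 iff count > 0.
def detectIDCC (w : String) : Int :=
  let w_ := PySem.Chars.splitOn w.toList [' ', '+', ' ']
  let counter : Int := w_.foldl (fun counter w__ =>
    let ss := PySem.Chars.split₀ w__
    (PySem.List.enumerate ss).foldl (fun counter p =>
      if p.1 > 0 ∧ p.2 = PySem.List.pyGetD ss (p.1 - 1) [] then counter + 1 else counter) counter) 0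
  if counter > 0 then 1 else 0

-- ===== PORT B =====
-- B: one char-level scan; `prev` = previous token of the current segment, `cur` = chars of the
-- token being read; ' + ' (checked first, like w.startswith(' + ', i)) closes the segment.
def scanIDCC (l : List Char) (prev : Option (List Char)) (cur : List Char) : Int :=
  match l with
  | [] => if cur ≠ [] ∧ some cur = prev then 1 else 0
  | c :: rest =>
    if [' ', '+', ' '].isPrefixOf (c :: rest) then
      if cur ≠ [] ∧ some cur = prev then 1
      else scanIDCC (rest.drop 2) none []
    else if PySem.Chars.isspace c then
      if cur ≠ [] then
        if some cur = prev then 1 else scanIDCC rest (some cur) []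
      else scanIDCC rest prev []
    else scanIDCC rest prev (cur ++ [c])
termination_by l.length
decreasing_by all_goals simp [List.length_drop]

def detectIDCC_alt (w : String) : Int := scanIDCC w.toList none []

-- ===== PRECONDITION & SPEC =====
def Spec_detectIDCC (w : String) (out : Int) : Prop := out = detectIDCC_alt w
instance (w : String) (out : Int) : Decidable (Spec_detectIDCC w out) := by unfold Spec_detectIDCC; infer_instance

-- ===== CLAIM (what is proved, stated in full; the proofs are below) =====
def Claim_equal_detectIDCC : Prop := ∀ (w : String), Dom_detectIDCC w → Spec_detectIDCC w (detectIDCC w)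

-- ===== LEMMAS AND PROOFS =====

-- spec-level tokenizer of one segment (= str.split() with a pending token `cur`)
def tokGo : List Char → List Char → List (List Char)
  | [], cur => if cur = [] then [] else [cur]
  | c :: rest, cur =>
    if PySem.Chars.isspace c then
      if cur = [] then tokGo rest [] else cur :: tokGo rest []
    else tokGo rest (cur ++ [c])

-- glue a char in front of the first segment
def consHead (c : Char) : List (List Char) → List (List Char)
  | [] => [[c]]
  | s :: ss => (c :: s) :: ss

-- spec-level segmentation of the whole string (= str.split(' + '), leftmost non-overlapping)
def segsSpec (l : List Char) : List (List Char) :=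
  match l with
  | [] => [[]]
  | c :: rest =>
    if [' ', '+', ' '].isPrefixOf (c :: rest) then [] :: segsSpec (rest.drop 2)
    else consHead c (segsSpec rest)
termination_by l.length
decreasing_by all_goals simp [List.length_drop]

lemma segsSpec_cons (c : Char) (rest : List Char) :
    segsSpec (c :: rest) =
      if [' ', '+', ' '].isPrefixOf (c :: rest) then [] :: segsSpec (rest.drop 2)
      else consHead c (segsSpec rest) := by
  rw [segsSpec.eq_def]

-- number of adjacent duplicates in a token list preceded by optional token `prev`
def cntAdj : Option (List Char) → List (List Char) → Nat
  | _, [] => 0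
  | prev, t :: ts => (if some t = prev then 1 else 0) + cntAdj (some t) ts

def totalCnt (S : List (List Char)) : Nat := (S.map fun s => cntAdj none (tokGo s [])).sum

def dupB : Option (List Char) → List Char → List (List Char) → Bool
  | _, _, [] => false
  | prev, cur, s :: ss =>
      decide (0 < cntAdj prev (tokGo s cur)) || ss.any (fun t => decide (0 < cntAdj none (tokGo t [])))

lemma split₀go_eq (s : List Char) : ∀ (cur : List Char) (accs : List (List Char)),
    PySem.Chars.split₀.go s cur accs = accs.reverse ++ tokGo s cur.reverse := by
  induction s with
  | nil =>
    intro cur accs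
    simp [PySem.Chars.split₀.go, tokGo, List.isEmpty_iff]
    split_ifs with h <;> simp_all
  | cons c rest ih =>
    intro cur accs
    by_cases hs : PySem.Chars.isspace c
    · by_cases hc : cur = []
      · simp [PySem.Chars.split₀.go, tokGo, hs, hc, ih]
      · simp [PySem.Chars.split₀.go, tokGo, hs, hc, List.isEmpty_iff, ih]
    · simp [PySem.Chars.split₀.go, tokGo, hs, ih]

lemma split₀_eq (s : List Char) : PySem.Chars.split₀ s = tokGo s [] := by
  simpa using split₀go_eq s [] []

def glueSeg (cs : List Char) : List (List Char) → List (List Char)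
  | [] => [cs]
  | s :: ss => (cs ++ s) :: ss

lemma segsSpec_ne_nil (l : List Char) : segsSpec l ≠ [] := by
  rw [segsSpec.eq_def]
  split
  · simp
  · split_ifs
    · simp
    · rename_i c rest _
      cases h : segsSpec rest <;> simp [consHead]


lemma glueSeg_nil (S : List (List Char)) (h : S ≠ []) : glueSeg [] S = S := by
  cases S <;> simp_all [glueSeg]

lemma glueSeg_cons (cs : List Char) (c : Char) (S : List (List Char)) :
    glueSeg (cs ++ [c]) S = glueSeg cs (consHead c S) := by
  cases S <;> simp [glueSeg, consHead]

lemma splitOngo_eq : ∀ (fuel : Nat) (l cur : List Char) (acc : List (List Char)),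
    l.length < fuel →
    PySem.Chars.splitOn.go [' ', '+', ' '] fuel l cur acc =
      acc.reverse ++ glueSeg cur.reverse (segsSpec l) := by
  intro fuel
  induction fuel with
  | zero => intro l cur acc h; omega
  | succ n ih =>
    intro l cur acc h
    cases l with
    | nil => simp [PySem.Chars.splitOn.go, segsSpec, glueSeg]
    | cons c rest =>
      by_cases hp : ([' ', '+', ' '].isPrefixOf (c :: rest)) = true
      · have hlen : rest.length ≥ 2 := by
          rcases List.IsPrefix.length_le (List.isPrefixOf_iff_prefix.mp hp) with h'
          simp at h'; omega
        have hd : List.drop 3 (c :: rest) = rest.drop 2 := by simp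
        rw [PySem.Chars.splitOn.go]
        simp only [hp, if_true, List.length_cons]
        rw [show List.drop ([].length + 1 + 1 + 1) (c :: rest) = List.drop 2 rest by simp]
        rw [ih (rest.drop 2) [] (cur.reverse :: acc) (by simp at h ⊢; omega)]
        rw [segsSpec_cons, if_pos hp]
        cases hS : segsSpec (rest.drop 2) with
        | nil => exact absurd hS (segsSpec_ne_nil _)
        | cons s ss => simp [glueSeg]
      · rw [PySem.Chars.splitOn.go]
        simp only [hp, if_false, Bool.false_eq_true]
        rw [ih rest (c :: cur) acc (by simp at h ⊢; omega)]
        rw [segsSpec_cons, if_neg hp]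
        simp [glueSeg_cons]

lemma splitOn_eq (l : List Char) : PySem.Chars.splitOn l [' ', '+', ' '] = segsSpec l := by
  rw [PySem.Chars.splitOn, splitOngo_eq (l.length + 1) l [] [] (by omega)]
  simp [glueSeg_nil _ (segsSpec_ne_nil l)]

def prevOf (ss : List (List Char)) (k : Nat) : Option (List Char) :=
  if k = 0 then none else ss[k - 1]?

lemma inner_eq (ss : List (List Char)) : ∀ (suf : List (List Char)) (k : Nat) (c : Int),
    ss.drop k = suf →
    (PySem.List.enumerate suf (k : Int)).foldl
      (fun counter p =>
        if p.1 > 0 ∧ p.2 = PySem.List.pyGetD ss (p.1 - 1) [] then counter + 1 else counter) c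
    = c + (cntAdj (prevOf ss k) suf : Int) := by
  intro suf
  induction suf with
  | nil => intro k c h; simp [cntAdj, PySem.List.enumerate]
  | cons t ts ih =>
    intro k c h
    have hk : k < ss.length := by
      have := congrArg List.length h
      simp at this; omega
    have hdrop : ss.drop (k + 1) = ts := by
      have h1 : ss.drop (k + 1) = (ss.drop k).drop 1 := by
        rw [List.drop_drop]
      rw [h1, h]; rfl
    have hget : ss[k]? = some t := by
      have h1 : (ss.drop k)[0]? = ss[k]? := by
        simp [List.getElem?_drop]
      rw [← h1, h]
      simp
    rw [PySem.List.enumerate_cons]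
    simp only [List.foldl_cons]
    have hcast : ((k:Int) + 1) = ((k + 1 : Nat) : Int) := by push_cast; ring
    rw [hcast, ih (k + 1) _ hdrop]
    have hprev1 : prevOf ss (k + 1) = some t := by
      simp [prevOf, hget]
    rw [hprev1]
    by_cases hk0 : k = 0
    · subst hk0
      have hcond : ¬((0:Int) > 0 ∧ t = PySem.List.pyGetD ss ((0:Int) - 1) []) := by
        simp
      rw [if_neg (by exact_mod_cast hcond)]
      simp [prevOf, cntAdj]
    · obtain ⟨u, hu⟩ : ∃ u, ss[k-1]? = some u :=
        ⟨ss[k-1]'(by omega), List.getElem?_eq_getElem (by omega)⟩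
      have hidx : ((k:Int) - 1) = ((k - 1 : Nat) : Int) := by omega
      have hgetD : PySem.List.pyGetD ss ((k:Int) - 1) [] = u := by
        rw [hidx, PySem.List.pyGetD_natCast, List.getD_eq_getElem?_getD, hu]
        rfl
      have hprev : prevOf ss k = some u := by simp [prevOf, hk0, hu]
      have hkpos : ((k:Int) > 0) := by omega
      rw [hgetD, hprev]
      by_cases ht : t = u
      · rw [if_pos ⟨hkpos, ht⟩, cntAdj, if_pos (by rw [ht])]
        push_cast; ring
      · rw [if_neg (by simp [ht]), cntAdj, if_neg (by simp [ht])]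
        push_cast; ring

lemma outer_eq : ∀ (S : List (List Char)) (c : Int),
    S.foldl (fun counter w__ =>
      let ss := PySem.Chars.split₀ w__
      (PySem.List.enumerate ss).foldl (fun counter p =>
        if p.1 > 0 ∧ p.2 = PySem.List.pyGetD ss (p.1 - 1) [] then counter + 1 else counter) counter) c
    = c + (totalCnt S : Int) := by
  intro S
  induction S with
  | nil => intro c; simp [totalCnt]
  | cons s S ih =>
    intro c
    simp only [List.foldl_cons]
    rw [ih]
    have h0 := inner_eq (PySem.Chars.split₀ s) (PySem.Chars.split₀ s) 0 c (by simp)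
    simp only [Nat.cast_zero] at h0
    rw [h0]
    simp only [prevOf, totalCnt, List.map_cons, List.sum_cons, split₀_eq, if_pos]
    push_cast; ring

lemma detectIDCC_eq (w : String) :
    detectIDCC w = if 0 < totalCnt (segsSpec w.toList) then 1 else 0 := by
  simp only [detectIDCC, splitOn_eq]
  rw [outer_eq]
  split_ifs with h1 h2 <;> first | rfl | (exfalso; omega)

lemma dupB_none (S : List (List Char)) :
    dupB none [] S = S.any (fun t => decide (0 < cntAdj none (tokGo t []))) := by
  cases S <;> simp [dupB]

lemma scan_eq : ∀ (l : List Char) (prev : Option (List Char)) (cur : List Char),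
    scanIDCC l prev cur = if dupB prev cur (segsSpec l) then 1 else 0 := by
  intro l prev cur
  induction l, prev, cur using scanIDCC.induct with
  | case1 prev cur h =>
    rw [scanIDCC, if_pos h]
    obtain ⟨h1, h2⟩ := h
    simp [segsSpec, dupB, tokGo, cntAdj, h1, h2.symm]
  | case2 prev cur h =>
    rw [scanIDCC, if_neg h]
    by_cases h1 : cur = []
    · simp [segsSpec, dupB, tokGo, cntAdj, h1]
    · have h2 : ¬ some cur = prev := fun hc => h ⟨h1, hc⟩
      simp [segsSpec, dupB, tokGo, cntAdj, h1, h2]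
  | case3 prev cur c rest hp h =>
    rw [scanIDCC]
    simp only [hp, if_true, if_pos h]
    obtain ⟨h1, h2⟩ := h
    rw [segsSpec_cons, if_pos hp]
    simp [dupB, tokGo, cntAdj, h1, h2.symm]
  | case4 prev cur c rest hp h ih =>
    rw [scanIDCC]
    simp only [hp, if_true, if_neg h]
    rw [segsSpec_cons, if_pos hp, ih, dupB_none]
    have hz : cntAdj prev (tokGo [] cur) = 0 := by
      by_cases h1 : cur = []
      · simp [tokGo, h1, cntAdj]
      · have h2 : ¬ some cur = prev := fun hc => h ⟨h1, hc⟩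
        simp [tokGo, h1, cntAdj, h2]
    simp [dupB, hz]
  | case5 cur c rest hp hs h1 =>
    rw [scanIDCC]
    simp only [hp, Bool.false_eq_true, if_false, hs, if_true, if_pos h1]
    rw [segsSpec_cons, if_neg hp]
    cases hS : segsSpec rest with
    | nil => exact absurd hS (segsSpec_ne_nil _)
    | cons s ss =>
      have : tokGo (c :: s) cur = cur :: tokGo s [] := by simp [tokGo, hs, h1]
      simp [consHead, dupB, this, cntAdj]
  | case6 prev cur c rest hp hs h1 h2 ih =>
    rw [scanIDCC]
    simp only [hp, Bool.false_eq_true, if_false, hs, if_true, if_pos h1, if_neg h2]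
    rw [segsSpec_cons, if_neg hp, ih]
    cases hS : segsSpec rest with
    | nil => exact absurd hS (segsSpec_ne_nil _)
    | cons s ss =>
      have ht : tokGo (c :: s) cur = cur :: tokGo s [] := by simp [tokGo, hs, h1]
      simp [consHead, dupB, ht, cntAdj, h2]
  | case7 prev cur c rest hp hs h1 ih =>
    rw [scanIDCC]
    simp only [hp, Bool.false_eq_true, if_false, hs, if_true, if_neg h1]
    rw [segsSpec_cons, if_neg hp, ih]
    have hcur : cur = [] := by simpa using h1
    cases hS : segsSpec rest with
    | nil => exact absurd hS (segsSpec_ne_nil _)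
    | cons s ss =>
      have ht : tokGo (c :: s) [] = tokGo s [] := by simp [tokGo, hs]
      simp [consHead, dupB, ht, hcur]
  | case8 prev cur c rest hp hs ih =>
    rw [scanIDCC]
    simp only [hp, Bool.false_eq_true, if_false, hs, if_false]
    rw [segsSpec_cons, if_neg hp, ih]
    cases hS : segsSpec rest with
    | nil => exact absurd hS (segsSpec_ne_nil _)
    | cons s ss =>
      have ht : tokGo (c :: s) cur = tokGo s (cur ++ [c]) := by simp [tokGo, hs]
      simp [consHead, dupB, ht]

lemma totalCnt_pos_iff (S : List (List Char)) :
    (0 < totalCnt S) ↔ (S.any (fun t => decide (0 < cntAdj none (tokGo t []))) = true) := by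
  induction S with
  | nil => simp [totalCnt]
  | cons s S ih =>
    simp only [totalCnt, List.map_cons, List.sum_cons, List.any_cons] at *
    simp only [Bool.or_eq_true, decide_eq_true_eq, ← ih]
    omega

-- ===== VERDICT (by name: the statement is the Claim_ definition above) =====
theorem detectIDCC_spec : Claim_equal_detectIDCC := by
  intro w _
  show detectIDCC w = detectIDCC_alt w
  rw [detectIDCC_eq, detectIDCC_alt, scan_eq, dupB_none]
  by_cases h : 0 < totalCnt (segsSpec w.toList)
  · simp [h, (totalCnt_pos_iff _).mp h]
  · have := (totalCnt_pos_iff (segsSpec w.toList)).not.mp h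
    simp [h, this]
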